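-- pv_equiv track=rewrite | github.com/cybersentinel-06/Data-Loss-Prevention | install_dlp_server.py | should_extract
-- ===== SOURCE A (Python) =====
-- INCLUDE_PATHS = [
--     "server/",
--     "dashboard/",
--     "database/",
--     "config/",
--     "docker-compose.yml",
--     "docker-compose.prod.yml",
--     ".env.example",
--     "deploy.sh",
--     "deploy-ubuntu.sh",
--     "Makefile",
--     "README.md",
--     "INSTALLATION_GUIDE.md",
-- ]
--
-- def should_extract(member_name, prefix):
--     """
--     Decide if a tarball member should be extracted.
--     *member_name* has the GitHub prefix (e.g. owner-repo-sha/server/...).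
--     """
--     # Strip the top-level GitHub directory prefix
--     rel = member_name[len(prefix):] if member_name.startswith(prefix) else member_name
--
--     for inc in INCLUDE_PATHS:
--         if inc.endswith("/"):
--             # Directory prefix match
--             if rel.startswith(inc) or rel == inc.rstrip("/"):
--                 return True
--         else:
--             # Exact file match
--             if rel == inc:
--                 return True
--     return False
-- ===== SOURCE B (Python) =====
-- DIR_NAMES = frozenset({"server", "dashboard", "database", "config"})
-- EXACT_FILES = frozenset({
--     "docker-compose.yml",
--     "docker-compose.prod.yml",
--     ".env.example",
--     "deploy.sh",
--     "deploy-ubuntu.sh",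
--     "Makefile",
--     "README.md",
--     "INSTALLATION_GUIDE.md",
-- })
--
-- def should_extract(member_name, prefix):
--     """
--     Decide if a tarball member should be extracted.
--     *member_name* has the GitHub prefix (e.g. owner-repo-sha/server/...).
--     """
--     rel = member_name[len(prefix):] if member_name.startswith(prefix) else member_name
--     head = rel.split("/", 1)[0]
--     return head in DIR_NAMES or rel in EXACT_FILES
-- ===== Notes on version B (the rewrite author's own statement) =====
-- stated objective: idiomatic
-- what changed: B replaces A's scan over the 12-entry INCLUDE_PATHS list with startswith/exact branches per entry by splitting off the first path segment of rel once and doing two frozenset membership tests (directory names vs exact files).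
import Mathlib
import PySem

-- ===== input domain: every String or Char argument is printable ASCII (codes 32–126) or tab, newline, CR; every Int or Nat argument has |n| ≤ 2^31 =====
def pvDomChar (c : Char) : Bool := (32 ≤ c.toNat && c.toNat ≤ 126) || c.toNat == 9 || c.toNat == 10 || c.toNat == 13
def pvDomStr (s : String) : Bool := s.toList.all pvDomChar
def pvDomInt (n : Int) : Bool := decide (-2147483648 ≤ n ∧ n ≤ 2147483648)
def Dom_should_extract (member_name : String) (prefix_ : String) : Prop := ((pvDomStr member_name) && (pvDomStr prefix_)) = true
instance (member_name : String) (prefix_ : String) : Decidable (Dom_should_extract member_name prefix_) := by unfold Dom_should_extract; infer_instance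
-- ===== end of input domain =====

-- B replaces A's per-entry scan of INCLUDE_PATHS (startswith/exact branch for each of the 12 entries)
-- by splitting off the first path segment of rel once and testing two set memberships (idiomatic restructuring).

-- ===== PORT A =====
-- the module constant INCLUDE_PATHS
def pvIncludePaths : List String :=
  ["server/", "dashboard/", "database/", "config/",
   "docker-compose.yml", "docker-compose.prod.yml", ".env.example",
   "deploy.sh", "deploy-ubuntu.sh", "Makefile", "README.md", "INSTALLATION_GUIDE.md"]

-- hand port of Python's  s.rstrip("/")  (PySem has no chars-argument rstrip):
-- drop trailing '/' characters from the right; exact for this single-character strip set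
def pvRstripSlash (cs : List Char) : List Char := (cs.reverse.dropWhile (· == '/')).reverse

-- the for-loop of A with its early returns
def pvLoopA (rel : List Char) : List String → Bool
  | [] => false
  | inc :: rest =>
    let ic := inc.toList
    if PySem.Chars.endswith ic ['/'] then
      if PySem.Chars.startswith rel ic || rel == pvRstripSlash ic then true else pvLoopA rel rest
    else
      if rel == ic then true else pvLoopA rel rest

def should_extract (member_name : String) (prefix_ : String) : Bool :=
  let mc := member_name.toList
  let pc := prefix_.toList
  -- rel = member_name[len(prefix):] if member_name.startswith(prefix) else member_name
  let rel := if PySem.Chars.startswith mc pc then PySem.Chars.slice mc (some (pc.length : Int)) none else mc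
  pvLoopA rel pvIncludePaths

-- ===== PORT B =====
-- the module constants DIR_NAMES and EXACT_FILES of Source B (sets of distinct strings, as lists)
def pvDirNames : List (List Char) :=
  ["server".toList, "dashboard".toList, "database".toList, "config".toList]

def pvExactFiles : List (List Char) :=
  ["docker-compose.yml".toList, "docker-compose.prod.yml".toList, ".env.example".toList,
   "deploy.sh".toList, "deploy-ubuntu.sh".toList, "Makefile".toList,
   "README.md".toList, "INSTALLATION_GUIDE.md".toList]

def should_extract_alt (member_name : String) (prefix_ : String) : Bool :=
  let mc := member_name.toList
  let pc := prefix_.toList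
  let rel := if PySem.Chars.startswith mc pc then PySem.Chars.slice mc (some (pc.length : Int)) none else mc
  -- head = rel.split("/", 1)[0]; split with a nonempty separator always returns a nonempty list, so [0] is the head
  let head := (PySem.Chars.splitOnMax rel ['/'] 1).headD []
  pvDirNames.contains head || pvExactFiles.contains rel

-- ===== PRECONDITION & SPEC =====
def Spec_should_extract (member_name : String) (prefix_ : String) (out : Bool) : Prop := out = should_extract_alt member_name prefix_
instance (member_name : String) (prefix_ : String) (out : Bool) : Decidable (Spec_should_extract member_name prefix_ out) := by unfold Spec_should_extract; infer_instance

-- ===== CLAIM (what is proved, stated in full; the proofs are below) =====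
def Claim_equal_should_extract : Prop := ∀ (member_name : String) (prefix_ : String), Dom_should_extract member_name prefix_ → Spec_should_extract member_name prefix_ (should_extract member_name prefix_)

-- ===== LEMMAS AND PROOFS =====

lemma pv_go_zero (fuel : Nat) (l cur : List Char) (acc : List (List Char)) :
    PySem.Chars.splitOnMax.go ['/'] fuel 0 l cur acc = ((cur.reverse ++ l) :: acc).reverse := by
  cases fuel with
  | zero => rfl
  | succ f => cases l <;> simp [PySem.Chars.splitOnMax.go]

lemma pv_go_head (fuel : Nat) : ∀ (l cur : List Char), l.length < fuel →
    (PySem.Chars.splitOnMax.go ['/'] fuel 1 l cur []).headD []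
      = cur.reverse ++ l.takeWhile (fun c => !(c == '/')) := by
  induction fuel with
  | zero => intro l cur h; omega
  | succ f ih =>
    intro l cur h
    cases l with
    | nil => simp [PySem.Chars.splitOnMax.go]
    | cons c rest =>
      have hlen : rest.length < f := by simpa using Nat.lt_of_succ_lt_succ h
      by_cases hc : c = '/'
      · subst hc
        rw [List.takeWhile_cons_of_neg (p := fun c => !(c == '/')) (a := '/') (by simp)]
        simp [PySem.Chars.splitOnMax.go, List.isPrefixOf, pv_go_zero]
      · have hp : List.isPrefixOf ['/'] (c :: rest) = false := by
          simp [List.isPrefixOf]; exact Ne.symm hc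
        simp only [PySem.Chars.splitOnMax.go, hp, Bool.false_eq_true, if_false,
          if_neg (by omega : ¬ (1 : Nat) = 0)]
        rw [ih rest (c :: cur) hlen,
          List.takeWhile_cons_of_pos (p := fun c => !(c == '/')) (by simp [hc])]
        simp

lemma pv_head_split (rel : List Char) :
    (PySem.Chars.splitOnMax rel ['/'] 1).headD [] = rel.takeWhile (fun c => !(c == '/')) := by
  unfold PySem.Chars.splitOnMax
  rw [if_neg (by omega)]
  simpa using pv_go_head (rel.length + 1) rel [] (by omega)

lemma pv_takeWhile_eq_iff (d : List Char) (hd : '/' ∉ d) : ∀ rel : List Char,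
    (rel.takeWhile (fun c => !(c == '/')) = d) ↔ ((d ++ ['/']) <+: rel ∨ rel = d) := by
  induction d with
  | nil =>
    intro rel
    cases rel with
    | nil => simp
    | cons c rest =>
      by_cases hc : c = '/'
      · subst hc
        rw [List.takeWhile_cons_of_neg (p := fun c => !(c == '/')) (a := '/') (by simp)]
        simp [List.cons_prefix_cons]
      · rw [List.takeWhile_cons_of_pos (p := fun c => !(c == '/')) (by simp [hc])]
        simp [List.cons_prefix_cons, Ne.symm hc]
  | cons a d' ih =>
    intro rel
    have ha : a ≠ '/' := fun h => hd (by simp [h])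
    have hd' : '/' ∉ d' := fun h => hd (by simp [h])
    cases rel with
    | nil => simp
    | cons c rest =>
      by_cases hc : c = '/'
      · subst hc
        rw [List.takeWhile_cons_of_neg (p := fun c => !(c == '/')) (a := '/') (by simp)]
        simp [List.cons_prefix_cons, ha, Ne.symm ha]
      · rw [List.takeWhile_cons_of_pos (p := fun c => !(c == '/')) (by simp [hc])]
        simp [List.cons_prefix_cons, ih hd' rest, and_or_left, @eq_comm _ a c]

lemma pv_dir_eq (d : List Char) (hd : '/' ∉ d) (rel : List Char) :
    ((PySem.Chars.splitOnMax rel ['/'] 1).headD [] == d)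
      = (PySem.Chars.startswith rel (d ++ ['/']) || rel == d) := by
  rw [pv_head_split]
  apply Bool.eq_iff_iff.mpr
  simp [pv_takeWhile_eq_iff d hd rel, PySem.Chars.startswith_iff]

set_option maxHeartbeats 2000000 in
lemma pv_core (rel : List Char) :
    pvLoopA rel pvIncludePaths
      = (pvDirNames.contains ((PySem.Chars.splitOnMax rel ['/'] 1).headD [])
          || pvExactFiles.contains rel) := by
  simp only [pvLoopA, pvIncludePaths, pvDirNames, pvExactFiles,
    List.contains_cons, List.contains_nil]
  rw [pv_dir_eq "server".toList (by decide) rel,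
      pv_dir_eq "dashboard".toList (by decide) rel,
      pv_dir_eq "database".toList (by decide) rel,
      pv_dir_eq "config".toList (by decide) rel]
  simp only [show PySem.Chars.endswith "server/".toList ['/'] = true from by decide,
    show PySem.Chars.endswith "dashboard/".toList ['/'] = true from by decide,
    show PySem.Chars.endswith "database/".toList ['/'] = true from by decide,
    show PySem.Chars.endswith "config/".toList ['/'] = true from by decide,
    show PySem.Chars.endswith "docker-compose.yml".toList ['/'] = false from by decide,
    show PySem.Chars.endswith "docker-compose.prod.yml".toList ['/'] = false from by decide,
    show PySem.Chars.endswith ".env.example".toList ['/'] = false from by decide,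
    show PySem.Chars.endswith "deploy.sh".toList ['/'] = false from by decide,
    show PySem.Chars.endswith "deploy-ubuntu.sh".toList ['/'] = false from by decide,
    show PySem.Chars.endswith "Makefile".toList ['/'] = false from by decide,
    show PySem.Chars.endswith "README.md".toList ['/'] = false from by decide,
    show PySem.Chars.endswith "INSTALLATION_GUIDE.md".toList ['/'] = false from by decide,
    show pvRstripSlash "server/".toList = "server".toList from by decide,
    show pvRstripSlash "dashboard/".toList = "dashboard".toList from by decide,
    show pvRstripSlash "database/".toList = "database".toList from by decide,
    show pvRstripSlash "config/".toList = "config".toList from by decide,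
    show "server".toList ++ ['/'] = "server/".toList from by decide,
    show "dashboard".toList ++ ['/'] = "dashboard/".toList from by decide,
    show "database".toList ++ ['/'] = "database/".toList from by decide,
    show "config".toList ++ ['/'] = "config/".toList from by decide]
  simp only [if_true, Bool.false_eq_true, if_false, Bool.if_true_left,
    Bool.decide_eq_true, Bool.or_false, Bool.or_assoc]

-- ===== VERDICT (by name: the statement is the Claim_ definition above) =====
theorem should_extract_spec : Claim_equal_should_extract := by
  intro member_name prefix_ _
  unfold Spec_should_extract should_extract should_extract_alt
  exact pv_core _
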